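-- pv_equiv track=rewrite | github.com/pocc/pre-commit-hooks | hooks/clang_format_hook.py | _split_files_from_cmd
-- ===== SOURCE A (Python) =====
-- def _split_files_from_cmd(cmd):
--     file_names = list()
--     for (ii, item) in enumerate(reversed(cmd)):
--         if item.startswith("-"):
--             # modify cmd inplace
--             return cmd[: len(cmd) - ii], file_names
--         else:
--             file_names.append(item)
--
--     return list(), file_names
-- ===== SOURCE B (Python) =====
-- def _split_files_from_cmd(cmd):
--     split = 0
--     for i, item in enumerate(cmd):
--         if item.startswith("-"):
--             split = i + 1
--     return cmd[:split], list(reversed(cmd[split:]))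
-- ===== Notes on version B (the rewrite author's own statement) =====
-- stated objective: simpler
-- what changed: B replaces A's short-circuiting reverse scan that accumulates file names with a single forward pass that records the index after the last flag, then slices the command once and reverses the tail.
import Mathlib
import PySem

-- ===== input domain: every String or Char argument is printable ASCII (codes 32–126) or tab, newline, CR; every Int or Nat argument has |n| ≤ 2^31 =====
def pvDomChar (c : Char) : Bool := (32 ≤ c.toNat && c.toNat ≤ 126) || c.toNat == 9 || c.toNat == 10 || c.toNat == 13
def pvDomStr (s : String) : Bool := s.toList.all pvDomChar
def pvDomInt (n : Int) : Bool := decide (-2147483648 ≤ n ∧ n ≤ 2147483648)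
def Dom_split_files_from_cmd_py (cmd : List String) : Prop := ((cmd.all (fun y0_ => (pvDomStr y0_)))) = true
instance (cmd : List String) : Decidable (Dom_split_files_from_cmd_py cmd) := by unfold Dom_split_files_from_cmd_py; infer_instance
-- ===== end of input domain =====

-- B replaces A's short-circuiting reverse scan accumulating file names with a forward pass
-- recording the index after the last flag, then a single slice + reverse (objective: simpler).

-- ===== PORT A =====
-- the 'for (ii, item) in enumerate(reversed(cmd))' loop of A, with its early return;
-- fns is the accumulated file_names list
def pvGoA (cmd : List String) : List String → Nat → List String → List String × List String
  | [], _, fns => ([], fns)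
  | item :: rest, ii, fns =>
    if PySem.Str.startswith item "-" then
      (PySem.List.slice cmd none (some ((cmd.length : Int) - (ii : Int))), fns)
    else pvGoA cmd rest (ii + 1) (fns ++ [item])

def split_files_from_cmd_py (cmd : List String) : List String × List String :=
  pvGoA cmd cmd.reverse 0 []

-- ===== PORT B =====
def split_files_from_cmd_py_alt (cmd : List String) : List String × List String :=
  let split : Int := (PySem.List.enumerate cmd).foldl
    (fun s p => if PySem.Str.startswith p.2 "-" then p.1 + 1 else s) 0
  (PySem.List.slice cmd none (some split), (PySem.List.slice cmd (some split) none).reverse)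

-- ===== PRECONDITION & SPEC =====
def Spec_split_files_from_cmd_py (cmd : List String) (out : List String × List String) : Prop := out = split_files_from_cmd_py_alt cmd
instance (cmd : List String) (out : List String × List String) : Decidable (Spec_split_files_from_cmd_py cmd out) := by unfold Spec_split_files_from_cmd_py; infer_instance

-- ===== CLAIM (what is proved, stated in full; the proofs are below) =====
def Claim_equal_split_files_from_cmd_py : Prop := ∀ (cmd : List String), Dom_split_files_from_cmd_py cmd → Spec_split_files_from_cmd_py cmd (split_files_from_cmd_py cmd)

-- ===== LEMMAS AND PROOFS =====

-- predicate for "does not start with '-'" (trailing file-name tokens)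
def pvNoFlag (s : String) : Bool := !(PySem.Str.startswith s "-")

-- A's loop: scanning the suffix l of cmd.reverse starting at reverse-index ii yields
-- the dropWhile/takeWhile split of l.
theorem pvGoA_char (l : List String) : ∀ (c : List String) (ii : Nat) (fns : List String),
    c.reverse.drop ii = l → ii ≤ c.length →
    pvGoA c l ii fns = ((l.dropWhile pvNoFlag).reverse, fns ++ l.takeWhile pvNoFlag) := by
  induction l with
  | nil => intro c ii fns _ _; simp [pvGoA]
  | cons x rest ih =>
    intro c ii fns hdrop hle
    by_cases hx : PySem.Str.startswith x "-"
    · have hpx : pvNoFlag x = false := by simp only [pvNoFlag, hx, Bool.not_true]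
      have htake : c.take (c.length - ii) = (x :: rest).reverse := by
        have : (c.reverse.drop ii).reverse = c.take (c.length - ii) := by
          rw [List.reverse_drop]; simp
        rw [← this, hdrop]
      have hcast : (c.length : Int) - (ii : Int) = ((c.length - ii : Nat) : Int) := by omega
      simp only [pvGoA, hx, if_true, List.dropWhile_cons, List.takeWhile_cons, hpx]
      rw [hcast, PySem.List.slice_to_natCast, htake]
      simp
    · have hxf : PySem.Str.startswith x "-" = false := by revert hx; simp
      have hpx : pvNoFlag x = true := by simp only [pvNoFlag, hxf, Bool.not_false]
      have hlt : ii < c.length := by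
        have h1 : c.reverse.drop ii ≠ [] := by rw [hdrop]; simp
        have := List.length_lt_of_drop_ne_nil h1
        simpa using this
      have hdrop' : c.reverse.drop (ii + 1) = rest := by
        have : c.reverse.drop (ii + 1) = (c.reverse.drop ii).drop 1 := by
          rw [List.drop_drop]
        rw [this, hdrop]; rfl
      simp only [pvGoA, hx, List.dropWhile_cons, List.takeWhile_cons, hpx]
      rw [ih c (ii + 1) (fns ++ [x]) hdrop' (by omega)]
      simp

-- B's forward foldl computes length minus the number of trailing non-flag tokens.
theorem pvEnumerate_append_singleton (xs : List String) (x : String) : ∀ (s : Int),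
    PySem.List.enumerate (xs ++ [x]) s = PySem.List.enumerate xs s ++ [(s + xs.length, x)] := by
  induction xs with
  | nil => intro s; simp [PySem.List.enumerate_cons, PySem.List.enumerate_nil]
  | cons y ys ih =>
    intro s
    simp only [List.cons_append, PySem.List.enumerate_cons, ih (s + 1)]
    simp; ring_nf

theorem pvSplit_char (cmd : List String) :
    (PySem.List.enumerate cmd).foldl
      (fun s p => if PySem.Str.startswith p.2 "-" then p.1 + 1 else s) 0
    = ((cmd.length - (cmd.reverse.takeWhile pvNoFlag).length : Nat) : Int) := by
  induction cmd using List.reverseRecOn with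
  | nil => simp [PySem.List.enumerate_nil]
  | append_singleton xs x ih =>
    rw [pvEnumerate_append_singleton xs x 0, List.foldl_append, ih]
    simp only [List.foldl_cons, List.foldl_nil]
    by_cases hx : PySem.Str.startswith x "-"
    · have hpx : pvNoFlag x = false := by simp only [pvNoFlag, hx, Bool.not_true]
      rw [if_pos hx]
      simp only [List.reverse_append, List.reverse_singleton, List.singleton_append,
        List.takeWhile_cons, hpx, Bool.false_eq_true, if_false, List.length_append,
        List.length_singleton, List.length_nil]
      push_cast
      ring
    · have hxf : PySem.Str.startswith x "-" = false := by revert hx; simp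
      have hpx : pvNoFlag x = true := by simp only [pvNoFlag, hxf, Bool.not_false]
      have ht : (xs.reverse.takeWhile pvNoFlag).length ≤ xs.length := by
        have := (List.takeWhile_sublist (l := xs.reverse) pvNoFlag).length_le
        simpa using this
      rw [if_neg hx]
      simp only [List.reverse_append, List.reverse_singleton, List.singleton_append,
        List.takeWhile_cons, hpx, if_true, List.length_append,
        List.length_cons]
      congr 1
      simp only [List.length_nil]
      omega

-- ===== VERDICT (by name: the statement is the Claim_ definition above) =====
theorem split_files_from_cmd_py_spec : Claim_equal_split_files_from_cmd_py := by
  intro cmd _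
  unfold Spec_split_files_from_cmd_py split_files_from_cmd_py
  rw [pvGoA_char cmd.reverse cmd 0 [] (by simp) (by simp)]
  simp only [split_files_from_cmd_py_alt, pvSplit_char]
  set tw := cmd.reverse.takeWhile pvNoFlag with htw
  set dw := cmd.reverse.dropWhile pvNoFlag with hdw
  have hsplitrev : cmd.reverse = tw ++ dw := (List.takeWhile_append_dropWhile).symm
  have hcmd : cmd = dw.reverse ++ tw.reverse := by
    have := congrArg List.reverse hsplitrev
    simpa using this
  have hlen : cmd.length = tw.length + dw.length := by
    have := congrArg List.length hsplitrev
    simpa using this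
  have hk : cmd.length - tw.length = dw.reverse.length := by simp; omega
  rw [PySem.List.slice_to_natCast, PySem.List.slice_from_natCast, hk]
  simp only [Prod.mk.injEq]
  constructor
  · rw [hcmd, List.take_left]
  · rw [hcmd, List.drop_left]
    simp
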